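-- pv_equiv track=rewrite | github.com/Mimix231/sm64dx | ai_tools/split_module.py | parse_csvish
-- ===== SOURCE A (Python) =====
-- from typing import Iterable, Sequence
--
-- def parse_csvish(values: Sequence[str] | None) -> list[str]:
--     if not values:
--         return []
--     items: list[str] = []
--     for value in values:
--         for part in value.split(","):
--             cleaned = part.strip()
--             if cleaned:
--                 items.append(cleaned)
--     return items
-- ===== SOURCE B (Python) =====
-- def _flush(out, buf):
--     tok = ''.join(buf).strip()
--     if tok:
--         out.append(tok)
--
-- def parse_csvish(values):
--     if not values:
--         return []
--     out = []
--     for value in values: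
--         buf = []
--         for ch in value:
--             if ch == ',':
--                 _flush(out, buf)
--                 buf = []
--             else:
--                 buf.append(ch)
--         _flush(out, buf)
--     return out
-- ===== Notes on version B (the rewrite author's own statement) =====
-- stated objective: alternative
-- what changed: B never calls str.split: it scans each value character by character with an explicit token buffer, flushing (strip, drop-if-empty, append) at each comma and at end of string, instead of A's split-then-strip-then-filter pipeline.
import Mathlib
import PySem

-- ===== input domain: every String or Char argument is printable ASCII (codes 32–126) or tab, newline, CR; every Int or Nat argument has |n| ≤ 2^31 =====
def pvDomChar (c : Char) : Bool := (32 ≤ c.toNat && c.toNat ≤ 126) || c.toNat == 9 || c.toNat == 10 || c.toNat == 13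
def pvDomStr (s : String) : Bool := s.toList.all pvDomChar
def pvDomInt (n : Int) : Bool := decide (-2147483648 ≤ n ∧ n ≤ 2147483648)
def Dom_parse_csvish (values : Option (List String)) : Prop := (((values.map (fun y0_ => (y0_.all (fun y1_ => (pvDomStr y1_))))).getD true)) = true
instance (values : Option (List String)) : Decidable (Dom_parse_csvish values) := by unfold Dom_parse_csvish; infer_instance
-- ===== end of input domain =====

-- B replaces A's split-then-strip-then-filter pipeline by a character-level tokenizer with an
-- explicit buffer, flushing a stripped nonempty token at each comma and at end of each value
-- (objective: alternative; same cost).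

-- ===== PORT A =====
def parse_csvish (values : Option (List String)) : List String :=
  match values with
  | none => []
  | some vs =>
    if vs = [] then []
    else
      vs.foldl (fun items value =>
        ((PySem.Str.split? value ",").getD []).foldl (fun items part =>
          let cleaned := PySem.Str.strip part
          if cleaned ≠ "" then items ++ [cleaned] else items) items) []

-- ===== PORT B =====
-- _flush: ''.join(buf) over a list of single characters is exactly String.ofList buf
def pcFlush (out : List String) (buf : List Char) : List String :=
  let tok := PySem.Str.strip (String.ofList buf)
  if tok ≠ "" then out ++ [tok] else out

def parse_csvish_alt (values : Option (List String)) : List String :=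
  match values with
  | none => []
  | some vs =>
    if vs = [] then []
    else
      vs.foldl (fun out value =>
        let st := value.toList.foldl (fun (st : List String × List Char) ch =>
          if ch = ',' then (pcFlush st.1 st.2, []) else (st.1, st.2 ++ [ch])) (out, [])
        pcFlush st.1 st.2) []

-- ===== PRECONDITION & SPEC =====
def Spec_parse_csvish (values : Option (List String)) (out : List String) : Prop := out = parse_csvish_alt values
instance (values : Option (List String)) (out : List String) : Decidable (Spec_parse_csvish values out) := by unfold Spec_parse_csvish; infer_instance

-- ===== CLAIM (what is proved, stated in full; the proofs are below) =====
def Claim_equal_parse_csvish : Prop := ∀ (values : Option (List String)), Dom_parse_csvish values → Spec_parse_csvish values (parse_csvish values)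

-- ===== LEMMAS AND PROOFS =====

-- simple recursive characterisation of splitting on a single-character separator
def mySplit (sep : Char) : List Char → List (List Char)
  | [] => [[]]
  | c :: rest => if c = sep then [] :: mySplit sep rest else (mySplit sep rest).modifyHead (c :: ·)

def prepHead (p : List Char) : List (List Char) → List (List Char)
  | [] => [p]
  | h :: t => (p ++ h) :: t

theorem mySplit_ne_nil (sep : Char) (l : List Char) : mySplit sep l ≠ [] := by
  cases l with
  | nil => simp [mySplit]
  | cons c rest =>
    simp only [mySplit]
    split
    · simp
    · cases h : mySplit sep rest with
      | nil => exact absurd h (mySplit_ne_nil sep rest)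
      | cons a b => simp

theorem go_char (sep : Char) (l : List Char) : ∀ fuel cur acc, l.length ≤ fuel →
    PySem.Chars.splitOn.go [sep] fuel l cur acc = acc.reverse ++ prepHead cur.reverse (mySplit sep l) := by
  induction l with
  | nil =>
    intro fuel cur acc _
    cases fuel <;> simp [PySem.Chars.splitOn.go, mySplit, prepHead]
  | cons c rest ih =>
    intro fuel cur acc hf
    cases fuel with
    | zero => simp at hf
    | succ f =>
      simp only [PySem.Chars.splitOn.go]
      by_cases hc : c = sep
      · subst hc
        rw [if_pos (by simp [List.isPrefixOf])]
        simp only [List.length_cons, List.length_nil, Nat.zero_add, List.drop_succ_cons, List.drop_zero]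
        rw [ih f [] (cur.reverse :: acc) (by simpa using hf)]
        simp only [mySplit]
        cases h : mySplit c rest with
        | nil => exact absurd h (mySplit_ne_nil c rest)
        | cons a b => simp [prepHead]
      · rw [if_neg (by simp [List.isPrefixOf]; exact fun h => hc h.symm)]
        rw [ih f (c :: cur) acc (by simpa using hf)]
        simp only [mySplit, if_neg hc]
        cases h : mySplit sep rest with
        | nil => exact absurd h (mySplit_ne_nil sep rest)
        | cons a b => simp [prepHead]

theorem splitOn_single (sep : Char) (l : List Char) : PySem.Chars.splitOn l [sep] = mySplit sep l := by
  rw [PySem.Chars.splitOn, go_char sep l (l.length + 1) [] [] (by omega)]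
  cases h : mySplit sep l with
  | nil => exact absurd h (mySplit_ne_nil sep l)
  | cons a b => simp [prepHead]

theorem mySplit_append (sep : Char) (a b : List Char) :
    mySplit sep (a ++ sep :: b) = mySplit sep a ++ mySplit sep b := by
  induction a with
  | nil => simp [mySplit]
  | cons c a' ih =>
    simp only [List.cons_append, mySplit, ih]
    split
    · rfl
    · cases h : mySplit sep a' with
      | nil => exact absurd h (mySplit_ne_nil sep a')
      | cons x t => simp

theorem mySplit_no_sep (sep : Char) : ∀ l, sep ∉ l → mySplit sep l = [l]
  | [], _ => rfl
  | c :: rest, h => by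
    have hc : ¬ c = sep := by rintro rfl; exact h (List.mem_cons_self ..)
    rw [mySplit, if_neg hc, mySplit_no_sep sep rest (fun hm => h (List.mem_cons_of_mem _ hm))]
    rfl

-- proof-side names for the two loop bodies
def pcStep (st : List String × List Char) (ch : Char) : List String × List Char :=
  if ch = ',' then (pcFlush st.1 st.2, []) else (st.1, st.2 ++ [ch])

def paStep (items : List String) (part : String) : List String :=
  let cleaned := PySem.Str.strip part
  if cleaned ≠ "" then items ++ [cleaned] else items

-- B's character scan over l (starting with comma-free buffer buf) followed by the final flush
-- equals A's strip-filter fold over the comma pieces of buf ++ l.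
theorem scan_eq : ∀ (l : List Char) (out : List String) (buf : List Char), ',' ∉ buf →
    pcFlush (l.foldl pcStep (out, buf)).1 (l.foldl pcStep (out, buf)).2
    = ((mySplit ',' (buf ++ l)).map String.ofList).foldl paStep out
  | [], out, buf, hbuf => by
    rw [List.foldl_nil, List.append_nil, mySplit_no_sep ',' buf hbuf]
    rfl
  | c :: l', out, buf, hbuf => by
    by_cases hc : c = ','
    · subst hc
      rw [List.foldl_cons, show pcStep (out, buf) ',' = (pcFlush out buf, []) from rfl,
        scan_eq l' (pcFlush out buf) [] (by simp), mySplit_append, mySplit_no_sep ',' buf hbuf]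
      rfl
    · rw [List.foldl_cons, show pcStep (out, buf) c = (out, buf ++ [c]) from if_neg hc,
        scan_eq l' out (buf ++ [c]) (by
          intro hm
          rcases List.mem_append.mp hm with h | h
          · exact hbuf h
          · simp at h; exact hc h.symm),
        List.append_assoc]
      rfl

-- per value, A's step and B's step agree (for every accumulator)
theorem step_eq (value : String) (out : List String) :
    pcFlush ((value.toList.foldl pcStep (out, [])).1) ((value.toList.foldl pcStep (out, [])).2)
    = ((PySem.Str.split? value ",").getD []).foldl paStep out := by
  have hsep : ("," : String).toList = [','] := rfl
  rw [scan_eq value.toList out [] (by simp)]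
  simp only [PySem.Str.split?, PySem.Chars.split?, hsep, List.isEmpty_cons, Bool.false_eq_true,
    if_false, Option.map_some, Option.getD_some, List.nil_append, splitOn_single]

theorem outer_eq (vs : List String) : ∀ acc : List String,
    vs.foldl (fun items value => ((PySem.Str.split? value ",").getD []).foldl paStep items) acc
    = vs.foldl (fun out value =>
        pcFlush ((value.toList.foldl pcStep (out, [])).1) ((value.toList.foldl pcStep (out, [])).2)) acc := by
  induction vs with
  | nil => intro acc; rw [List.foldl_nil, List.foldl_nil]
  | cons v vs ih =>
    intro acc
    rw [List.foldl_cons, List.foldl_cons, step_eq]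
    exact ih _

-- ===== VERDICT (by name: the statement is the Claim_ definition above) =====
theorem parse_csvish_spec : Claim_equal_parse_csvish := by
  intro values _
  unfold Spec_parse_csvish parse_csvish parse_csvish_alt
  cases values with
  | none => rfl
  | some vs =>
    by_cases hvs : vs = []
    · simp [hvs]
    · simp only [if_neg hvs]
      exact outer_eq vs []
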